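-- pv_equiv track=rewrite | github.com/heyaaakash/roastmyaudio | whisper-flow/src/web_ui/app.py | _filter_hallucinations
-- ===== SOURCE A (Python) =====
-- def _filter_hallucinations(text: str) -> str:
--     """
--     Filter out hallucinated text patterns that Whisper commonly generates.
--
--     Aggressive detection of:
--     - Single words/phrases repeated excessively (>10% of transcript)
--     - Filler-heavy transcriptions (>30% fillers and pronouns)
--
--     Args:
--         text: Raw transcription text from Whisper
--
--     Returns:
--         Filtered text with hallucinations removed
--     """
--     if not text or len(text.strip()) < 3:
--         return text
--
--     words = text.split()
--     if not words:
--         return text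
--
--     total_words = len(words)
--
--     # Count word frequencies
--     word_counts = {}
--     for word in words:
--         normalized = word.lower().rstrip('.,!?;:')
--         word_counts[normalized] = word_counts.get(normalized, 0) + 1
--
--     # Find the most repeated word
--     if word_counts:
--         most_common_word = max(word_counts, key=word_counts.get)
--         most_common_count = word_counts[most_common_word]
--
--         # If any single word is >10% of text, it's likely a hallucination
--         if most_common_count / total_words > 0.1:
--             # Remove all instances of this dominant hallucination word
--             filtered_words = [
--                 w for w in words
--                 if w.lower().rstrip('.,!?;:') != most_common_word
--             ]
--             if filtered_words:
--                 # Recursively apply filter to catch secondary hallucinations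
--                 return _filter_hallucinations(" ".join(filtered_words))
--             return ""
--
--     # Filler/pronoun detection
--     hallucination_indicators = {
--         'you', 'i', 'uh', 'um', 'ah', 'so', 'ok', 'thank', 'well', 'like', 'just'
--     }
--
--     hallucin_count = sum(
--         1 for word in words
--         if word.lower().rstrip('.,!?;:') in hallucination_indicators
--     )
--
--     # If >30% are fillers, extract only content
--     if hallucin_count / total_words > 0.3:
--         real_words = [
--             w for w in words
--             if w.lower().rstrip('.,!?;:') not in hallucination_indicators
--         ]
--         if real_words and len(real_words) >= 3:
--             return " ".join(real_words)
--         return ""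
--
--     # Strip leading/trailing junk
--     start_idx = 0
--     for i, word in enumerate(words):
--         normalized = word.lower().rstrip('.,!?;:')
--         if normalized not in hallucination_indicators and len(normalized) > 1:
--             start_idx = i
--             break
--
--     end_idx = len(words) - 1
--     for i in range(len(words) - 1, -1, -1):
--         normalized = words[i].lower().rstrip('.,!?;:')
--         if normalized not in hallucination_indicators and len(normalized) > 1:
--             end_idx = i
--             break
--
--     if start_idx <= end_idx:
--         return " ".join(words[start_idx:end_idx + 1]).strip()
--
--     return ""
-- ===== SOURCE B (Python) =====
-- _FILLERS = frozenset({'you', 'i', 'uh', 'um', 'ah', 'so', 'ok', 'thank',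
--                       'well', 'like', 'just'})
--
--
-- def _norm(word):
--     return word.lower().rstrip('.,!?;:')
--
--
-- def _filter_hallucinations(text: str) -> str:
--     # Dominant-word removal as an explicit loop instead of recursion; the
--     # guards are re-checked at the top of every iteration, exactly as the
--     # recursion re-ran them on each rejoined string.
--     while True:
--         if not text or len(text.strip()) < 3:
--             return text
--         words = text.split()
--         if not words:
--             return text
--         total = len(words)
--         counts = {}
--         for w in words:
--             n = _norm(w)
--             counts[n] = counts.get(n, 0) + 1
--         dominant = max(counts, key=counts.get)
--         # count/total > 0.1, exactly
--         if counts[dominant] * 10 > total: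
--             kept = [w for w in words if _norm(w) != dominant]
--             if not kept:
--                 return ""
--             text = " ".join(kept)
--             continue
--         break
--
--     # Filler detection: one pass building the content words; the filler
--     # count is what is left over.
--     real_words = [w for w in words if _norm(w) not in _FILLERS]
--     if (total - len(real_words)) * 10 > 3 * total:  # ratio > 0.3, exactly
--         if len(real_words) >= 3:
--             return " ".join(real_words)
--         return ""
--
--     # Trim leading/trailing junk: collect the content positions once.
--     content = [i for i, w in enumerate(words)
--                if _norm(w) not in _FILLERS and len(_norm(w)) > 1]
--     start_idx = content[0] if content else 0
--     end_idx = content[-1] if content else total - 1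
--     if start_idx <= end_idx:
--         return " ".join(words[start_idx:end_idx + 1]).strip()
--     return ""
-- ===== Notes on version B (the rewrite author's own statement) =====
-- stated objective: alternative
-- what changed: A's recursive dominant-word removal becomes an explicit while loop that re-checks the guards each iteration, the filler count is obtained as total minus the length of one content-word filter pass instead of a separate 0/1 sum, and the two leading/trailing trim scans are replaced by one pass collecting the content positions and taking its first/last entry.
import Mathlib
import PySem

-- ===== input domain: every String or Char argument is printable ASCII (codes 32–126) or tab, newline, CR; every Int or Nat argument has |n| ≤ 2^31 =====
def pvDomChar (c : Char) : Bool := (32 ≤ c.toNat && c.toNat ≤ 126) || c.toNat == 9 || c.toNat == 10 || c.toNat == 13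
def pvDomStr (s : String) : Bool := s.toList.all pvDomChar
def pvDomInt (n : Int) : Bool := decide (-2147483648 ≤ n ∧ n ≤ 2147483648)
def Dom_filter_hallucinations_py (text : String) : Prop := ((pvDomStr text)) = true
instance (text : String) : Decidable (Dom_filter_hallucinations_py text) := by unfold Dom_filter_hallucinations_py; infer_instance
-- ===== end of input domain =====

-- B rewrites A's recursive dominant-word removal as an explicit loop (re-checking A's top guards
-- each iteration) and replaces A's three extra passes (filler-count sum, first-index loop,
-- last-index reverse loop) by one filter and one content-position list; objective: alternative.

-- shared normalization: word.lower().rstrip('.,!?;:') — rstrip with a char set ported by hand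
-- (drop from the right while the char is in the set); exact on all strings
def pvPunct : List Char := ['.', ',', '!', '?', ';', ':']
def pvNorm (w : List Char) : List Char :=
  ((PySem.Chars.lower w).reverse.dropWhile (fun c => decide (c ∈ pvPunct))).reverse

-- the hallucination_indicators set literal (used only via membership, so order is irrelevant)
def pvFillers : List (List Char) :=
  ["you".toList, "i".toList, "uh".toList, "um".toList, "ah".toList, "so".toList,
   "ok".toList, "thank".toList, "well".toList, "like".toList, "just".toList]

-- the trim-loop condition shared by both ports: a content word (not a filler, length > 1)
def pvPred (w : List Char) : Bool := decide (pvNorm w ∉ pvFillers) && decide (1 < (pvNorm w).length)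

-- ===== PORT A =====
-- A's code after the dominant-word branch: filler detection, then leading/trailing trim loops.
-- float comparisons c/total > 0.3 ported as the exact 3*total < c*10 (floats do not disturb the
-- comparison at these magnitudes).
def pvTailA (words : List (List Char)) (total : Nat) : List Char :=
  let hallucin_count : Int :=
    words.foldl (fun acc w => if pvNorm w ∈ pvFillers then acc + 1 else acc) 0
  if 3 * (total : Int) < hallucin_count * 10 then
    let real_words := words.filter (fun w => decide (pvNorm w ∉ pvFillers))
    if real_words ≠ [] ∧ 3 ≤ real_words.length then PySem.Chars.join [' '] real_words else []
  else
    let start_idx : Nat := match List.findIdx? pvPred words with | some i => i | none => 0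
    let end_idx : Nat := match List.findIdx? pvPred words.reverse with | some j => total - 1 - j | none => total - 1
    if start_idx ≤ end_idx then
      PySem.Chars.strip (PySem.Chars.join [' '] (PySem.List.slice words (some (start_idx : Int)) (some ((end_idx : Int) + 1))))
    else []

-- A's recursion; fuel (text length + 1, strictly more than the possible recursion depth: each
-- recursive call drops at least one word from the text) only makes the same computation total.
-- c/total > 0.1 ported as the exact total < c*10.
def pvRunA : Nat → List Char → List Char
  | 0, cs => cs  -- fuel exhausted: never reached
  | fuel + 1, cs =>
    if cs = [] ∨ (PySem.Chars.strip cs).length < 3 then cs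
    else
      let words := PySem.Chars.split₀ cs
      if words = [] then cs
      else
        let total := words.length
        let word_counts := words.foldl
          (fun d w => d.insert (pvNorm w) (d.getD (pvNorm w) 0 + 1)) (PySem.Dict.empty (ν := Nat))
        match PySem.List.max? word_counts.keys (fun k => word_counts.getD k 0) with
        | some most_common_word =>
          if total < word_counts.getD most_common_word 0 * 10 then
            let filtered_words := words.filter (fun w => decide (pvNorm w ≠ most_common_word))
            if filtered_words ≠ [] then pvRunA fuel (PySem.Chars.join [' '] filtered_words)
            else []
          else pvTailA words total
        | none => pvTailA words total  -- `if word_counts:` false: fall through to the tail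

def filter_hallucinations_py (text : String) : String :=
  String.ofList (pvRunA (text.toList.length + 1) text.toList)

-- ===== PORT B =====
-- B's tail: one filter gives the content words (filler count = total - its length), and the
-- trim indices are the first/last entries of the content-position list built in one pass.
def pvTailB (words : List (List Char)) (total : Nat) : List Char :=
  let real_words := words.filter (fun w => decide (pvNorm w ∉ pvFillers))
  if 3 * (total : Int) < ((total : Int) - real_words.length) * 10 then
    if 3 ≤ real_words.length then PySem.Chars.join [' '] real_words else []
  else
    let content := ((PySem.List.enumerate words).filter (fun p => pvPred p.2)).map (·.1)
    let start_idx : Int := content.head?.getD 0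
    let end_idx : Int := content.getLast?.getD ((total : Int) - 1)
    if start_idx ≤ end_idx then
      PySem.Chars.strip (PySem.Chars.join [' '] (PySem.List.slice words (some start_idx) (some (end_idx + 1))))
    else []

-- B's `while True` loop: inl = an early `return`, inr = `break` with the loop state (words, total);
-- same fuel wrapper as A's port, making the same computation total.
def pvLoopB : Nat → List Char → (List Char) ⊕ (List (List Char) × Nat)
  | 0, cs => Sum.inl cs  -- fuel exhausted: never reached
  | fuel + 1, cs =>
    if cs = [] ∨ (PySem.Chars.strip cs).length < 3 then Sum.inl cs
    else
      let words := PySem.Chars.split₀ cs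
      if words = [] then Sum.inl cs
      else
        let total := words.length
        let counts := words.foldl
          (fun d w => d.insert (pvNorm w) (d.getD (pvNorm w) 0 + 1)) (PySem.Dict.empty (ν := Nat))
        match PySem.List.max? counts.keys (fun k => counts.getD k 0) with
        | some dominant =>
          if total < counts.getD dominant 0 * 10 then
            let kept := words.filter (fun w => decide (pvNorm w ≠ dominant))
            if kept = [] then Sum.inl []
            else pvLoopB fuel (PySem.Chars.join [' '] kept)
          else Sum.inr (words, total)
        | none => Sum.inr (words, total)  -- unreachable: words ≠ [], so counts is nonempty

def filter_hallucinations_py_alt (text : String) : String :=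
  match pvLoopB (text.toList.length + 1) text.toList with
  | Sum.inl s => String.ofList s
  | Sum.inr (words, total) => String.ofList (pvTailB words total)

-- ===== PRECONDITION & SPEC =====
def Spec_filter_hallucinations_py (text : String) (out : String) : Prop := out = filter_hallucinations_py_alt text
instance (text : String) (out : String) : Decidable (Spec_filter_hallucinations_py text out) := by unfold Spec_filter_hallucinations_py; infer_instance

-- ===== CLAIM (what is proved, stated in full; the proofs are below) =====
def Claim_equal_filter_hallucinations_py : Prop := ∀ (text : String), Dom_filter_hallucinations_py text → Spec_filter_hallucinations_py text (filter_hallucinations_py text)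

-- ===== LEMMAS AND PROOFS =====

-- first content position: head of B's position list = A's first-match loop
theorem pv_head_content (q : List Char → Bool) (words : List (List Char)) (n : Int) :
    (((PySem.List.enumerate words n).filter (fun p => q p.2)).map (·.1)).head?
      = Option.map (fun (i : Nat) => (i : Int) + n) (List.findIdx? q words) := by
  induction words generalizing n with
  | nil => simp [PySem.List.enumerate]
  | cons w ws ih =>
    simp only [PySem.List.enumerate, List.filter_cons, List.findIdx?_cons]
    by_cases hq : q w
    · simp [hq]
    · simp only [hq, Bool.false_eq_true, if_false, ih]
      cases hf : List.findIdx? q ws <;> simp [Int.add_comm, Int.add_left_comm]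

theorem pv_enumerate_append (xs : List (List Char)) (w : List Char) (n : Int) :
    PySem.List.enumerate (xs ++ [w]) n = PySem.List.enumerate xs n ++ [(n + xs.length, w)] := by
  induction xs generalizing n with
  | nil => simp [PySem.List.enumerate]
  | cons x t ih =>
    simp only [List.cons_append, PySem.List.enumerate, ih, List.length_cons]
    push_cast; ring_nf

-- last content position: last of B's position list = A's reverse first-match loop
theorem pv_last_content (q : List Char → Bool) (words : List (List Char)) (n : Int) :
    (((PySem.List.enumerate words n).filter (fun p => q p.2)).map (·.1)).getLast?
      = Option.map (fun (j : Nat) => n + ((words.length - 1 - j : Nat) : Int)) (List.findIdx? q words.reverse) := by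
  induction words using List.reverseRecOn with
  | nil => simp [PySem.List.enumerate]
  | append_singleton ws w ih =>
    rw [pv_enumerate_append]
    simp only [List.filter_append, List.map_append, List.reverse_append, List.reverse_singleton,
      List.singleton_append, List.findIdx?_cons, List.length_append, List.length_singleton]
    by_cases hq : q w
    · simp [hq]
    · simp only [hq, Bool.false_eq_true, if_false, List.filter_cons, List.filter_nil,
        List.map_nil, List.append_nil, ih]
      cases hf : List.findIdx? q ws.reverse with
      | none => simp
      | some j =>
        have hj : j < ws.length := by
          have h2 := List.findIdx?_eq_some_iff_getElem.mp hf
          obtain ⟨h3, -⟩ := h2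
          simpa using h3
        simp only [Option.map_some]
        congr 1
        omega

theorem pv_tail_eq (words : List (List Char)) (h : words ≠ []) :
    pvTailA words words.length = pvTailB words words.length := by
  simp only [pvTailA, pvTailB]
  have hcount : words.foldl (fun acc w => if pvNorm w ∈ pvFillers then acc + 1 else acc) (0:Int)
      = (words.length : Int) - (words.filter (fun w => decide (pvNorm w ∉ pvFillers))).length := by
    rw [PySem.List.foldl_ite_add_one (p := fun w => pvNorm w ∈ pvFillers)]
    have hsplit := List.length_eq_countP_add_countP (fun w => decide (pvNorm w ∈ pvFillers)) (l := words)
    have hfil : (words.filter (fun w => decide (pvNorm w ∉ pvFillers))).length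
        = List.countP (fun a => decide ¬(decide (pvNorm a ∈ pvFillers)) = true) words := by
      rw [← List.countP_eq_length_filter]
      apply List.countP_congr
      intro x _
      simp
    rw [hfil]
    omega
  rw [hcount]
  set real := words.filter (fun w => decide (pvNorm w ∉ pvFillers)) with hreal
  by_cases hb : 3 * (words.length : Int) < ((words.length : Int) - real.length) * 10
  · rw [if_pos hb, if_pos hb]
    by_cases h3 : 3 ≤ real.length
    · rw [if_pos ⟨by intro hnil; rw [hnil] at h3; simp at h3, h3⟩, if_pos h3]
    · rw [if_neg (by tauto), if_neg h3]
  · rw [if_neg hb, if_neg hb]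
    rw [pv_head_content pvPred words 0, pv_last_content pvPred words 0]
    have htot : 1 ≤ words.length := by
      cases words with | nil => exact absurd rfl h | cons a t => simp
    cases hf : List.findIdx? pvPred words with
    | none =>
      have hnone : List.findIdx? pvPred words.reverse = none := by
        rw [List.findIdx?_eq_none_iff] at hf ⊢
        intro x hx; exact hf x (List.mem_reverse.mp hx)
      rw [hnone]
      simp only [Option.map_none, Option.getD_none]
      rw [if_pos (Nat.zero_le _), if_pos (by omega : (0:Int) ≤ (words.length : Int) - 1)]
      rw [Nat.cast_zero, show (((words.length - 1 : Nat) : Int) + 1) = (words.length : Int) - 1 + 1 by omega]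
    | some i =>
      have hrev : ∃ j, List.findIdx? pvPred words.reverse = some j := by
        obtain ⟨hi, hqi, -⟩ := List.findIdx?_eq_some_iff_getElem.mp hf
        rcases hj : List.findIdx? pvPred words.reverse with _ | j
        · rw [List.findIdx?_eq_none_iff] at hj
          exact absurd (hj words[i] (List.mem_reverse.mpr (List.getElem_mem hi))) (by simp [hqi])
        · exact ⟨j, rfl⟩
      obtain ⟨j, hj⟩ := hrev
      have hjlt : j < words.length := by
        obtain ⟨hjl, -, -⟩ := List.findIdx?_eq_some_iff_getElem.mp hj
        simpa using hjl
      rw [hj]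
      simp only [Option.map_some, Option.getD_some]
      by_cases hle : i ≤ words.length - 1 - j
      · rw [if_pos hle, if_pos (by omega)]
        rw [show ((i : Int) + 0) = (i : Int) by ring,
            show ((0 : Int) + ((words.length - 1 - j : Nat) : Int) + 1) = ((words.length - 1 - j : Nat) : Int) + 1 by ring]
      · rw [if_neg hle, if_neg (by omega)]

theorem pv_run_eq (fuel : Nat) (cs : List Char) :
    pvRunA fuel cs = (match pvLoopB fuel cs with
      | Sum.inl s => s
      | Sum.inr (w, t) => pvTailB w t) := by
  induction fuel generalizing cs with
  | zero => rfl
  | succ fuel ih =>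
    simp only [pvRunA, pvLoopB]
    by_cases h1 : cs = [] ∨ (PySem.Chars.strip cs).length < 3
    · simp only [if_pos h1]
    · simp only [if_neg h1]
      by_cases h2 : PySem.Chars.split₀ cs = []
      · simp only [if_pos h2]
      · simp only [if_neg h2]
        split
        · rename_i mcw heq
          by_cases h3 : (PySem.Chars.split₀ cs).length <
              ((PySem.Chars.split₀ cs).foldl
                (fun d w => d.insert (pvNorm w) (d.getD (pvNorm w) 0 + 1))
                (PySem.Dict.empty (ν := Nat))).getD mcw 0 * 10
          · rw [if_pos h3, if_pos h3]
            by_cases h4 : (PySem.Chars.split₀ cs).filter (fun w => decide (pvNorm w ≠ mcw)) = []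
            · rw [if_neg (by simpa using h4), if_pos h4]
            · rw [if_pos h4, if_neg (by simpa using h4)]
              exact ih _
          · rw [if_neg h3, if_neg h3]
            exact pv_tail_eq _ h2
        · exact pv_tail_eq _ h2

-- ===== VERDICT (by name: the statement is the Claim_ definition above) =====
theorem filter_hallucinations_py_spec : Claim_equal_filter_hallucinations_py := by
  intro text _
  unfold Spec_filter_hallucinations_py filter_hallucinations_py filter_hallucinations_py_alt
  rw [pv_run_eq]
  cases h : pvLoopB (text.toList.length + 1) text.toList with
  | inl s => rfl
  | inr p => rfl
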